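-- pv_equiv track=rewrite | github.com/Kiara7777/VUT-FIT-IPP | projekt2/cha.py | DESTROY_Macro
-- ===== SOURCE A (Python) =====
-- def DESTROY_Macro(file_text):
--     line_text = file_text.split("\n") #pozor ztratim nove radky
--     stav = 0
--     makro_pokr = False
--     fulltext = ""
--     for line in line_text: #radky
--         line += '\n' #pridat ztracence \n, bude tam jeden navic, ale snad to nebude vadit
--         if (line[0:1] == "#" or makro_pokr):
--             for c in line: #znaky
--                 if (stav == 0 and c == '\\'):   #nasla jsem \, mozne pokracovani makra na dlasim radku
--                     stav = 1
--                 elif (stav == 1 and c == "\n"): #jo bylo to pokracovani makra na dalsim radku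
--                     stav = 0
--                     makro_pokr = True
--                 else:
--                     stav = 0
--                     makro_pokr = False
--         else:
--             fulltext += line
--     return fulltext
-- ===== SOURCE B (Python) =====
-- def DESTROY_Macro(file_text):
--     kept = []
--     cont = False
--     for line in file_text.split("\n"):
--         if cont or line.startswith("#"):
--             # macro line: it continues iff the run of trailing backslashes has ODD length
--             k = 0
--             while k < len(line) and line[len(line) - 1 - k] == '\\':
--                 k += 1
--             cont = k % 2 == 1
--         else:
--             kept.append(line + "\n")
--     return "".join(kept)
-- ===== Notes on version B (the rewrite author's own statement) =====
-- stated objective: simpler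
-- what changed: Replaced the nested per-character two-state automaton with a direct odd-parity test on each macro line's trailing backslash run, and built the result as a list of kept lines joined once instead of repeated string concatenation.
import Mathlib
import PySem

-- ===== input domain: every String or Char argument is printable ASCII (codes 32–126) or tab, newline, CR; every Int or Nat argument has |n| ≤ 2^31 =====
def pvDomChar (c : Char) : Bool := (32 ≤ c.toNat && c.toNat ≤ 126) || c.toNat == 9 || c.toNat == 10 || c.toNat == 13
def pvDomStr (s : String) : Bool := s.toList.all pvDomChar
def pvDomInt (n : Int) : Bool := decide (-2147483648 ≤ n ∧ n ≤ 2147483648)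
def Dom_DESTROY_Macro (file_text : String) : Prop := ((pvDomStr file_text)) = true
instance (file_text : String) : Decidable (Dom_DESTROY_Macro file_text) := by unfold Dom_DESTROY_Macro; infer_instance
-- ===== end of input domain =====

-- B replaces A's per-character two-state automaton by a direct parity test of the
-- trailing-backslash run on each macro line (objective: simpler, one pass per line).


-- ===== PORT A =====
-- inner character loop of A: state (stav, makro_pokr)
def pvAStep (st : Int × Bool) (c : Char) : Int × Bool :=
  if st.1 = 0 ∧ c = '\\' then (1, st.2)
  else if st.1 = 1 ∧ c = '\n' then (0, true)
  else (0, false)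

def pvAInner (st : Int × Bool) (cs : List Char) : Int × Bool :=
  cs.foldl pvAStep st

-- fulltext is accumulated as a List Char (Python string concatenation)
def DESTROY_Macro (file_text : String) : String :=
  let line_text := (PySem.Str.split? file_text "\n").getD []
  let r := line_text.foldl
    (fun (acc : Int × Bool × List Char) l0 =>
      let line := l0.toList ++ ['\n']
      if PySem.Chars.slice line (some 0) (some 1) = ['#'] ∨ acc.2.1 = true then
        let s := pvAInner (acc.1, acc.2.1) line
        (s.1, s.2, acc.2.2)
      else
        (acc.1, acc.2.1, acc.2.2 ++ line))
    (0, false, [])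
  String.ofList r.2.2

-- ===== PORT B =====
-- hand port of Source B's while loop: number of contiguous trailing backslashes
def pvTrailBS (cs : List Char) : Nat := (cs.reverse.takeWhile (· = '\\')).length

def DESTROY_Macro_alt (file_text : String) : String :=
  let r := ((PySem.Str.split? file_text "\n").getD []).foldl
    (fun (acc : Bool × List (List Char)) l0 =>
      if acc.1 = true ∨ PySem.Str.startswith l0 "#" = true then
        (decide (pvTrailBS l0.toList % 2 = 1), acc.2)
      else
        (acc.1, acc.2 ++ [l0.toList ++ ['\n']]))
    (false, [])
  String.ofList r.2.flatten

-- ===== PRECONDITION & SPEC =====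
def Spec_DESTROY_Macro (file_text : String) (out : String) : Prop := out = DESTROY_Macro_alt file_text
instance (file_text : String) (out : String) : Decidable (Spec_DESTROY_Macro file_text out) := by unfold Spec_DESTROY_Macro; infer_instance

-- ===== CLAIM (what is proved, stated in full; the proofs are below) =====
def Claim_equal_DESTROY_Macro : Prop := ∀ (file_text : String), Dom_DESTROY_Macro file_text → Spec_DESTROY_Macro file_text (DESTROY_Macro file_text)

-- ===== LEMMAS AND PROOFS =====

lemma pvTrailBS_snoc (ds : List Char) (c : Char) :
    pvTrailBS (ds ++ [c]) = if c = '\\' then pvTrailBS ds + 1 else 0 := by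
  simp [pvTrailBS, List.takeWhile]
  split_ifs with h
  · simp [h]
  · simp [h]

-- stav after running the automaton from stav = 0 is the parity of the trailing backslash run
lemma pvAInner_fst (cs : List Char) (p : Bool) :
    (pvAInner (0, p) cs).1 = if pvTrailBS cs % 2 = 1 then (1 : Int) else 0 := by
  induction cs using List.reverseRecOn with
  | nil => simp [pvAInner, pvTrailBS]
  | append_singleton ds c ih =>
    rcases hst : pvAInner (0, p) ds with ⟨s1, s2⟩
    rw [pvAInner, List.foldl_append, show List.foldl pvAStep (0, p) ds = (s1, s2) from hst]
    rw [hst] at ih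
    rw [pvTrailBS_snoc]
    by_cases hc : c = '\\'
    · subst hc
      simp only [List.foldl_cons, List.foldl_nil]
      by_cases hodd : pvTrailBS ds % 2 = 1
      · have h1 : s1 = 1 := by simpa [if_pos hodd] using ih
        subst h1
        simp [pvAStep]
        omega
      · have h1 : s1 = 0 := by simpa [if_neg hodd] using ih
        subst h1
        simp [pvAStep]
        omega
    · simp only [if_neg hc, List.foldl_cons, List.foldl_nil]
      simp [pvAStep, hc]
      split <;> rfl

-- full state after a line terminated by '\n': stav 0, continuation = odd parity
lemma pvAInner_newline (cs : List Char) (p : Bool) :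
    pvAInner (0, p) (cs ++ ['\n']) = (0, decide (pvTrailBS cs % 2 = 1)) := by
  rcases hst : pvAInner (0, p) cs with ⟨s1, s2⟩
  have h := pvAInner_fst cs p
  rw [hst] at h
  rw [pvAInner, List.foldl_append, show List.foldl pvAStep (0, p) cs = (s1, s2) from hst]
  by_cases hodd : pvTrailBS cs % 2 = 1
  · have h1 : s1 = 1 := by simpa [if_pos hodd] using h
    subst h1
    simp [pvAStep, hodd]
  · have h1 : s1 = 0 := by simpa [if_neg hodd] using h
    subst h1
    simp [pvAStep, hodd]

-- the two branch guards agree: (l0 ++ '\n')[0:1] == "#"  ↔  l0.startswith("#")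
lemma pvGuard (l0 : String) :
    (PySem.Chars.slice (l0.toList ++ ['\n']) (some 0) (some 1) = ['#']) ↔
      (PySem.Str.startswith l0 "#" = true) := by
  rcases hl : l0.toList with _ | ⟨c, cs⟩ <;>
    simp [PySem.List.slice_to, PySem.Str.startswith, hl, PySem.Chars.startswith]
  exact eq_comm

-- main loop correspondence
lemma pvLoop (lines : List String) (p : Bool) (tb : List Char) (kb : List (List Char))
    (hinv : tb = kb.flatten) :
    (lines.foldl
      (fun (acc : Int × Bool × List Char) l0 =>
        let line := l0.toList ++ ['\n']
        if PySem.Chars.slice line (some 0) (some 1) = ['#'] ∨ acc.2.1 = true then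
          let s := pvAInner (acc.1, acc.2.1) line
          (s.1, s.2, acc.2.2)
        else
          (acc.1, acc.2.1, acc.2.2 ++ line))
      (0, p, tb)).2.2 =
    ((lines.foldl
      (fun (acc : Bool × List (List Char)) l0 =>
        if acc.1 = true ∨ PySem.Str.startswith l0 "#" = true then
          (decide (pvTrailBS l0.toList % 2 = 1), acc.2)
        else
          (acc.1, acc.2 ++ [l0.toList ++ ['\n']]))
      (p, kb)).2).flatten := by
  induction lines generalizing p tb kb with
  | nil => simpa using hinv
  | cons l0 rest ih =>
    simp only [List.foldl_cons]
    by_cases hg : PySem.Chars.slice (l0.toList ++ ['\n']) (some 0) (some 1) = ['#'] ∨ p = true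
    · have hg' : p = true ∨ PySem.Str.startswith l0 "#" = true := by
        rcases hg with h | h
        · exact Or.inr ((pvGuard l0).mp h)
        · exact Or.inl h
      rw [if_pos hg, if_pos hg']
      simp only [pvAInner_newline]
      exact ih _ _ _ hinv
    · have hg' : ¬ (p = true ∨ PySem.Str.startswith l0 "#" = true) := by
        rintro (h | h)
        · exact hg (Or.inr h)
        · exact hg (Or.inl ((pvGuard l0).mpr h))
      rw [if_neg hg, if_neg hg']
      exact ih _ _ _ (by simp [hinv])

-- ===== VERDICT (by name: the statement is the Claim_ definition above) =====
theorem DESTROY_Macro_spec : Claim_equal_DESTROY_Macro := by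
  intro file_text _
  unfold Spec_DESTROY_Macro DESTROY_Macro DESTROY_Macro_alt
  exact congrArg String.ofList (pvLoop _ false [] [] rfl)
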